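-- pv_equiv track=rewrite | github.com/alenbob/studio-quantikz | quantikz_statevector_evolution.py | format_initial_state
-- ===== SOURCE A (Python) =====
-- def format_initial_state(row_labels: list[str], label_spans: dict[int, tuple[str, int]]) -> str:
--     parts: list[str] = []
--     consumed: set[int] = set()
--     for row in range(len(row_labels)):
--         if row in consumed:
--             continue
--         span_entry = label_spans.get(row)
--         if span_entry is not None:
--             label, span = span_entry
--             consumed.update(range(row, row + span))
--             if span == 1:
--                 parts.append(label)
--             else:
--                 wires = ",".join(f"q{index}" for index in range(row, row + span))
--                 parts.append(f"{label}_(%s)" % wires)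
--             continue
--         if row_labels[row]:
--             parts.append(row_labels[row])
--         else:
--             parts.append(f"|q{row}>")
--     return " x ".join(parts)
-- ===== SOURCE B (Python) =====
-- def format_initial_state(row_labels: list[str], label_spans: dict[int, tuple[str, int]]) -> str:
--     parts: list[str] = []
--     row = 0
--     n = len(row_labels)
--     while row < n:
--         entry = label_spans.get(row)
--         if entry is not None:
--             label, span = entry
--             if span == 1:
--                 parts.append(label)
--             else:
--                 wires = ",".join(f"q{q}" for q in range(row, row + span))
--                 parts.append(f"{label}_(%s)" % wires)
--             row += max(span, 1)
--         else:
--             parts.append(row_labels[row] if row_labels[row] else f"|q{row}>")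
--             row += 1
--     return " x ".join(parts)
-- ===== Notes on version B (the rewrite author's own statement) =====
-- stated objective: simpler
-- what changed: Replaced the for-over-all-rows loop with a 'consumed' set by an index-cursor while-loop that jumps row += max(span, 1) over spanned rows; no set bookkeeping, output (including the legacy %-interpolation of the wire list) is unchanged.
import Mathlib
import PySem

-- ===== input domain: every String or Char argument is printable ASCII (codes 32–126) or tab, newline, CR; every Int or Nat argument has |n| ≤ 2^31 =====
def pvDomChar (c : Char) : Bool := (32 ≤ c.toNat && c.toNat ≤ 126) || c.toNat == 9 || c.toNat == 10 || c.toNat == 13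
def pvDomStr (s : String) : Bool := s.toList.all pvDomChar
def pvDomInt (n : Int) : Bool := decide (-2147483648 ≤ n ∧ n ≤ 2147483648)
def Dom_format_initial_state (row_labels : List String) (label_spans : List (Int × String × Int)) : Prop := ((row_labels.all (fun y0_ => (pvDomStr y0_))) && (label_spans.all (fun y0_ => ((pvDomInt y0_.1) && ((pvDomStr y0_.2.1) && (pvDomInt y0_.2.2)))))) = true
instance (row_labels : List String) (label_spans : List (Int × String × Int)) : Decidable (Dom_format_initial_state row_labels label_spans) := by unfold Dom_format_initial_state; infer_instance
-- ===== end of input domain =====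

-- B replaces A's scan over all rows with a `consumed` set by an index cursor that jumps over
-- spanned rows (row += max(span,1)); objective: simpler, no set bookkeeping; output unchanged.

-- ===== PORT A =====
-- hand-port of Python's C-style `fmt % arg` for ONE string argument: exact on format strings
-- whose '%' characters occur only as '%%' pairs or a single '%s' (all Pre_ admits);
-- `none` models the TypeError/ValueError Python raises on stray '%' conversions.
def pyPercentFmt : List Char → String → Bool → Option String
  | [], _, used => if used then some "" else none
  | '%' :: '%' :: r, a, u => (pyPercentFmt r a u).map (fun s => "%" ++ s)
  | '%' :: 's' :: r, a, u => if u then none else (pyPercentFmt r a true).map (fun s => a ++ s)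
  | '%' :: _, _, _ => none
  | c :: r, a, u => (pyPercentFmt r a u).map (fun s => String.mk [c] ++ s)

-- one loop iteration of A's for-loop: state is (parts, consumed)
def fisStepA (row_labels : List String) (label_spans : List (Int × String × Int))
    (st : List String × PySem.Set Int) (row : Int) : List String × PySem.Set Int :=
  let parts := st.1
  let consumed := st.2
  if PySem.Set.contains consumed row then (parts, consumed)
  else
    match (PySem.Dict.mk label_spans).get? row with
    | some (label, span) =>
        let consumed := PySem.Set.update consumed (PySem.List.pyRange row (row + span) 1)
        if span == 1 then (parts ++ [label], consumed)
        else
          let wires := PySem.Str.join "," ((PySem.List.pyRange row (row + span) 1).map (fun index => "q" ++ PySem.Int.toStr index))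
          (parts ++ [(pyPercentFmt (label ++ "_(%s)").toList wires false).getD ""], consumed)
    | none =>
        if PySem.List.pyGetD row_labels row "" ≠ "" then (parts ++ [PySem.List.pyGetD row_labels row ""], consumed)
        else (parts ++ ["|q" ++ PySem.Int.toStr row ++ ">"], consumed)

def format_initial_state (row_labels : List String) (label_spans : List (Int × String × Int)) : String :=
  PySem.Str.join " x "
    ((PySem.List.pyRange 0 (PySem.List.len row_labels) 1).foldl
      (fisStepA row_labels label_spans) ([], PySem.Set.empty)).1

-- ===== PORT B =====
-- B's while-loop: cursor `row`, emits one part and jumps by max(span,1); the while loop is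
-- encoded with a fuel counter (one unit per remaining row; each iteration consumes >= 1 row)
def fisGoB (row_labels : List String) (label_spans : List (Int × String × Int)) : Nat → Nat → List String
  | 0, _ => []
  | fuel + 1, row =>
    if h : row < row_labels.length then
      match (PySem.Dict.mk label_spans).get? (row : Int) with
      | some (label, span) =>
          let part :=
            if span == 1 then label
            else
              let wires := PySem.Str.join "," ((PySem.List.pyRange (row : Int) ((row : Int) + span) 1).map (fun q => "q" ++ PySem.Int.toStr q))
              (pyPercentFmt (label ++ "_(%s)").toList wires false).getD ""
          part :: fisGoB row_labels label_spans fuel (row + (max span 1).toNat)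
      | none =>
          (if row_labels[row] ≠ "" then row_labels[row] else "|q" ++ PySem.Int.toStr (row : Int) ++ ">")
            :: fisGoB row_labels label_spans fuel (row + 1)
    else []

def format_initial_state_alt (row_labels : List String) (label_spans : List (Int × String × Int)) : String :=
  PySem.Str.join " x " (fisGoB row_labels label_spans row_labels.length 0)

-- ===== PRECONDITION & SPEC =====
-- every maximal run of '%' in the label has even length (all '%' come in '%%' pairs)
def pctOk : List Char → Bool
  | [] => true
  | '%' :: '%' :: r => pctOk r
  | '%' :: _ => false
  | _ :: r => pctOk r

-- A raises (TypeError/ValueError from `f"{label}_(%s)" % wires`) when it reaches a span≠1 entry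
-- whose label contains a '%' not forming a '%%' pair; Pre_ excludes those inputs via the
-- closed-form key-in-range approximation of reachability, so a few inputs where such an entry
-- is skipped (its row consumed by an earlier span, or shadowed by a duplicate key) are
-- excluded too although both programs return the same value there.
def Pre_format_initial_state (row_labels : List String) (label_spans : List (Int × String × Int)) : Prop :=
  (label_spans.all (fun e =>
    !(decide (0 ≤ e.1) && decide (e.1 < (row_labels.length : Int)) && !(e.2.2 == 1)) || pctOk e.2.1.toList)) = true
instance (row_labels : List String) (label_spans : List (Int × String × Int)) : Decidable (Pre_format_initial_state row_labels label_spans) := by unfold Pre_format_initial_state; infer_instance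

def pvWitness_format_initial_state : List String × (List (Int × String × Int)) :=
  ([], [])

def Spec_format_initial_state (row_labels : List String) (label_spans : List (Int × String × Int)) (out : String) : Prop := out = format_initial_state_alt row_labels label_spans
instance (row_labels : List String) (label_spans : List (Int × String × Int)) (out : String) : Decidable (Spec_format_initial_state row_labels label_spans out) := by unfold Spec_format_initial_state; infer_instance

-- ===== CLAIM (what is proved, stated in full; the proofs are below) =====
def Claim_equal_format_initial_state : Prop := ∀ (row_labels : List String) (label_spans : List (Int × String × Int)), Dom_format_initial_state row_labels label_spans → Pre_format_initial_state row_labels label_spans → Spec_format_initial_state row_labels label_spans (format_initial_state row_labels label_spans)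

-- ===== LEMMAS AND PROOFS =====

-- folding A's step over rows that are all already consumed leaves the state unchanged
lemma fisFold_consumed (row_labels : List String) (label_spans : List (Int × String × Int))
    (l : List Int) (st : List String × PySem.Set Int)
    (h : ∀ x ∈ l, PySem.Set.contains st.2 x = true) :
    l.foldl (fisStepA row_labels label_spans) st = st := by
  induction l with
  | nil => rfl
  | cons x xs ih =>
      have hx := (PySem.Set.contains_iff _ _).1 (h x (by simp))
      have hstep : fisStepA row_labels label_spans st x = st := by
        simp [fisStepA, hx]
      rw [List.foldl_cons, hstep]
      exact ih (fun y hy => h y (by simp [hy]))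

-- B's loop emits nothing at or past the end of the rows
lemma fisGoB_nil (row_labels : List String) (label_spans : List (Int × String × Int))
    (fuel row : Nat) (h : row_labels.length ≤ row) :
    fisGoB row_labels label_spans fuel row = [] := by
  cases fuel with
  | zero => rfl
  | succ f => simp [fisGoB, Nat.not_lt.mpr h]

-- main invariant: A's fold from row r equals parts ++ B's cursor loop from r (any sufficient
-- fuel), provided every consumed row is below r
lemma fisLoop_eq (row_labels : List String) (label_spans : List (Int × String × Int)) :
    ∀ (k r : Nat) (parts : List String) (S : PySem.Set Int),
      row_labels.length - r ≤ k →
      (∀ x ∈ S, x < (r : Int)) →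
      ((PySem.List.pyRange (r : Int) (row_labels.length : Int) 1).foldl
        (fisStepA row_labels label_spans) (parts, S)).1
        = parts ++ fisGoB row_labels label_spans k r := by
  intro k
  induction k with
  | zero =>
      intro r parts S hk hS
      have hge : row_labels.length ≤ r := by omega
      rw [PySem.List.pyRange_one_eq_nil (by exact_mod_cast hge)]
      simp [fisGoB]
  | succ k ih =>
      intro r parts S hk hS
      by_cases hr : r < row_labels.length
      · rw [PySem.List.pyRange_one_cons (by exact_mod_cast hr), List.foldl_cons]
        have hnc : ¬ ((r : Int) ∈ S) := fun hm => absurd (hS _ hm) (by omega)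
        show _ = parts ++ fisGoB row_labels label_spans (k + 1) r
        rw [fisGoB]
        simp only [hr, dif_pos]
        cases hget : (PySem.Dict.mk label_spans).get? (r : Int) with
        | none =>
            have hgd : PySem.List.pyGetD row_labels (r : Int) "" = row_labels[r] := by
              simp [PySem.List.pyGetD_natCast, List.getD_eq_getElem?_getD, hr]
            have hstep : fisStepA row_labels label_spans (parts, S) (r : Int)
                = (parts ++ [if row_labels[r] ≠ "" then row_labels[r] else "|q" ++ PySem.Int.toStr (r : Int) ++ ">"], S) := by
              simp only [fisStepA, hget]
              by_cases hlbl : row_labels[r] = "" <;> simp [hgd, hlbl, hnc]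
            rw [hstep]
            have := ih (r + 1) (parts ++ [if row_labels[r] ≠ "" then row_labels[r] else "|q" ++ PySem.Int.toStr (r : Int) ++ ">"]) S
              (by omega) (fun x hx => by have := hS x hx; push_cast; omega)
            push_cast at this ⊢
            rw [this, List.append_assoc]
            rfl
        | some lv =>
            obtain ⟨label, span⟩ := lv
            set S' := PySem.Set.update S (PySem.List.pyRange (r : Int) ((r : Int) + span) 1) with hS'def
            set p : String :=
              (if span == 1 then label
               else (pyPercentFmt (label ++ "_(%s)").toList
                 (PySem.Str.join "," ((PySem.List.pyRange (r : Int) ((r : Int) + span) 1).map (fun q => "q" ++ PySem.Int.toStr q))) false).getD "") with hpdef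
            have hstep : fisStepA row_labels label_spans (parts, S) (r : Int) = (parts ++ [p], S') := by
              simp only [fisStepA, hget]
              by_cases h1 : span == 1 <;> simp [hpdef, h1, hS'def, hnc]
            rw [hstep]
            -- the cursor jump
            set a : Nat := (max span 1).toNat with hadef
            have ha1 : 1 ≤ a := by
              have : (1 : Int) ≤ max span 1 := le_max_right _ _
              omega
            have haval : (a : Int) = max span 1 := by
              have : (0 : Int) ≤ max span 1 := by
                have := le_max_right span (1 : Int); omega
              omega
            have hS'lt : ∀ x ∈ S', x < (r : Int) + (a : Int) := by
              intro x hx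
              rcases (PySem.Set.mem_update S _ x).1 hx with h | h
              · have := hS x h; omega
              · have := (PySem.List.mem_pyRange_one).1 h
                have hle : span ≤ max span 1 := le_max_left _ _
                rw [haval]; omega
            by_cases hend : r + a < row_labels.length
            · -- split the remaining range at r + a
              have hsplit : PySem.List.pyRange ((r : Int) + 1) (row_labels.length : Int) 1
                  = PySem.List.pyRange ((r : Int) + 1) ((r : Int) + (a : Int)) 1
                    ++ PySem.List.pyRange ((r : Int) + (a : Int)) (row_labels.length : Int) 1 :=
                PySem.List.pyRange_one_append _ _ _ (by omega) (by exact_mod_cast Nat.le_of_lt hend)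
              rw [hsplit, List.foldl_append]
              have hskip : (PySem.List.pyRange ((r : Int) + 1) ((r : Int) + (a : Int)) 1).foldl
                  (fisStepA row_labels label_spans) (parts ++ [p], S') = (parts ++ [p], S') := by
                apply fisFold_consumed
                intro x hx
                have hxr := (PySem.List.mem_pyRange_one).1 hx
                apply (PySem.Set.contains_iff _ _).2
                apply (PySem.Set.mem_update S _ x).2
                right
                apply (PySem.List.mem_pyRange_one).2
                have : (1 : Int) < a := by
                  rcases hxr with ⟨h1, h2⟩; omega
                have hspan2 : (1 : Int) < span := by
                  by_contra hle
                  rw [Int.not_lt] at hle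
                  have : max span 1 = 1 := by omega
                  rw [this] at haval; omega
                have hms : max span 1 = span := by omega
                rw [hms] at haval
                rcases hxr with ⟨h1, h2⟩
                constructor <;> omega
              rw [hskip]
              have hrec := ih (r + a) (parts ++ [p]) S' (by omega)
                (fun x hx => by have := hS'lt x hx; push_cast; omega)
              push_cast at hrec
              rw [hrec, List.append_assoc]
              rfl
            · -- cursor jumps past the end: remaining rows are all consumed
              have hskip : (PySem.List.pyRange ((r : Int) + 1) (row_labels.length : Int) 1).foldl
                  (fisStepA row_labels label_spans) (parts ++ [p], S') = (parts ++ [p], S') := by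
                apply fisFold_consumed
                intro x hx
                have hxr := (PySem.List.mem_pyRange_one).1 hx
                apply (PySem.Set.contains_iff _ _).2
                apply (PySem.Set.mem_update S _ x).2
                right
                apply (PySem.List.mem_pyRange_one).2
                have hxn : x < (row_labels.length : Int) := hxr.2
                have hxa : x < (r : Int) + (a : Int) := by
                  have : (row_labels.length : Int) ≤ (r : Int) + (a : Int) := by
                    have : row_labels.length ≤ r + a := by omega
                    exact_mod_cast this
                  omega
                have : (1 : Int) < a := by
                  rcases hxr with ⟨h1, h2⟩
                  by_contra hle
                  rw [Int.not_lt] at hle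
                  have ha1' : (a : Int) = 1 := by omega
                  rw [ha1'] at hxa; omega
                have hspan2 : (1 : Int) < span := by
                  by_contra hle
                  rw [Int.not_lt] at hle
                  have : max span 1 = 1 := by omega
                  rw [this] at haval; omega
                have hms : max span 1 = span := by omega
                rw [hms] at haval
                rcases hxr with ⟨h1, h2⟩
                constructor <;> omega
              rw [hskip]
              show (parts ++ [p], S').1 = parts ++ (p :: fisGoB row_labels label_spans k (r + a))
              rw [fisGoB_nil row_labels label_spans k (r + a) (by omega)]
      · rw [PySem.List.pyRange_one_eq_nil (by exact_mod_cast Nat.le_of_not_lt hr)]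
        simp [fisGoB, hr]

-- ===== VERDICT (by name: the statement is the Claim_ definition above) =====
theorem format_initial_state_spec : Claim_equal_format_initial_state := by
  intro row_labels label_spans _ _
  unfold Spec_format_initial_state format_initial_state format_initial_state_alt
  have h := fisLoop_eq row_labels label_spans row_labels.length 0 [] PySem.Set.empty
    (by omega) (by intro x hx; simp [PySem.Set.empty] at hx)
  simp only [Nat.cast_zero] at h
  rw [PySem.List.len_eq]
  rw [h]
  rfl
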